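-- pv_equiv track=rewrite | github.com/deepmetric-agent/corsadata | backend/services/gpx_analyzer.py | _build_tactical_summary
-- ===== SOURCE A (Python) =====
-- from typing import Any
--
-- def _build_tactical_summary(
--     stats: dict[str, Any],
--     roadbook: list[dict[str, Any]],
-- ) -> dict[str, str]:
--     """Generate a one-paragraph tactical briefing."""
--     climbs = [e for e in roadbook if e["type"] == "climb"]
--     descents = [e for e in roadbook if e["type"] == "descent"]
--     wind_zones = [e for e in roadbook if e["type"] == "wind"]
--     rain_zones = [e for e in roadbook if e["type"] == "rain"]
--
--     parts = []
--     parts.append(f"Etapa de {stats.get('d_pos', 0)}m D+ con {len(climbs)} puerto(s).")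
--
--     if descents:
--         parts.append(f"{len(descents)} descenso(s) tecnico(s).")
--     if wind_zones:
--         parts.append(f"Atencion: {len(wind_zones)} zona(s) de viento lateral.")
--     if rain_zones:
--         parts.append(f"Prevision de lluvia en {len(rain_zones)} tramo(s).")
--
--     est_time = stats.get("est_time_min", 0)
--     if est_time:
--         hours = int(est_time // 60)
--         mins = int(est_time % 60)
--         parts.append(f"Tiempo estimado: {hours}h{mins:02d}.")
--
--     high_events = [e for e in roadbook if e.get("severity") == "high"]
--     if high_events:
--         parts.append(f"{len(high_events)} evento(s) de prioridad ALTA.")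
--
--     return {"summary": " ".join(parts)}
-- ===== SOURCE B (Python) =====
-- def _build_tactical_summary(stats, roadbook):
--     """One counting pass over the roadbook instead of five filtering passes."""
--     counts = {}
--     high = 0
--     for e in roadbook:
--         t = e["type"]
--         counts[t] = counts.get(t, 0) + 1
--         if e.get("severity") == "high":
--             high += 1
--
--     parts = [f"Etapa de {stats.get('d_pos', 0)}m D+ con {counts.get('climb', 0)} puerto(s)."]
--
--     n = counts.get("descent", 0)
--     if n:
--         parts.append(f"{n} descenso(s) tecnico(s).")
--     n = counts.get("wind", 0)
--     if n:
--         parts.append(f"Atencion: {n} zona(s) de viento lateral.")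
--     n = counts.get("rain", 0)
--     if n:
--         parts.append(f"Prevision de lluvia en {n} tramo(s).")
--
--     est_time = stats.get("est_time_min", 0)
--     if est_time:
--         parts.append(f"Tiempo estimado: {est_time // 60}h{est_time % 60:02d}.")
--
--     if high:
--         parts.append(f"{high} evento(s) de prioridad ALTA.")
--
--     return {"summary": " ".join(parts)}
-- ===== Notes on version B (the rewrite author's own statement) =====
-- stated objective: simpler
-- what changed: Replaces A's five separate list-comprehension passes over the roadbook with a single counting loop that builds a type-count table plus a high-severity counter, then formats the summary from the counts.
-- outside the precondition, e.g. on _build_tactical_summary({}, [{'severity': 'high'}]): A raises KeyError, B raises KeyError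
import Mathlib
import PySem

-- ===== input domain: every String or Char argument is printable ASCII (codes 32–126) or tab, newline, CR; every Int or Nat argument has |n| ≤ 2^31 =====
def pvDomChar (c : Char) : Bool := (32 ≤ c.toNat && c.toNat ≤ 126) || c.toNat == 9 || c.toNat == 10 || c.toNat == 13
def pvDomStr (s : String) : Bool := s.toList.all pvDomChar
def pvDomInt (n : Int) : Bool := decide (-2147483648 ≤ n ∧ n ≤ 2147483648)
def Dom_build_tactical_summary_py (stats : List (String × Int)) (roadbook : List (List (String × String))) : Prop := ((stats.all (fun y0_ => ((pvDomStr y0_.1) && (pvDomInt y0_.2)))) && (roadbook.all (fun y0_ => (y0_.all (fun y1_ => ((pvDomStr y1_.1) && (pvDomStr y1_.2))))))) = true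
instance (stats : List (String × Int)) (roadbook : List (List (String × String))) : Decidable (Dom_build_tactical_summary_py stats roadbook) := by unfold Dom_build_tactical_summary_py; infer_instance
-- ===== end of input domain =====

-- B replaces A's five filtering passes over the roadbook by one counting pass (a type-count
-- table plus a high-severity counter) and formats the summary from the counts: simpler, one pass.

-- e["type"] (KeyError when absent — exactly the inputs Pre_ excludes; under Pre_ the getD "" default is never used)
def pvTypeGet (e : List (String × String)) : String :=
  ((PySem.Dict.mk e).get? "type").getD ""

-- e.get("severity") == "high"
def pvHighSev (e : List (String × String)) : Bool :=
  (PySem.Dict.mk e).get? "severity" == some "high"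

-- f"{m:02d}" for m = est_time % 60 (0 ≤ m < 60, so a single optional leading zero is exact)
def pvPad2 (m : Int) : String :=
  if m < 10 then "0" ++ PySem.Int.toStr m else PySem.Int.toStr m

-- ===== PORT A =====
def build_tactical_summary_py (stats : List (String × Int)) (roadbook : List (List (String × String))) : List (String × String) :=
  let climbs := roadbook.filter (fun e => pvTypeGet e == "climb")
  let descents := roadbook.filter (fun e => pvTypeGet e == "descent")
  let wind_zones := roadbook.filter (fun e => pvTypeGet e == "wind")
  let rain_zones := roadbook.filter (fun e => pvTypeGet e == "rain")
  let parts : List String :=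
    ["Etapa de " ++ PySem.Int.toStr ((PySem.Dict.mk stats).getD "d_pos" 0) ++ "m D+ con "
      ++ PySem.Int.toStr (climbs.length : Int) ++ " puerto(s)."]
  let parts := if descents.isEmpty then parts else
    parts ++ [PySem.Int.toStr (descents.length : Int) ++ " descenso(s) tecnico(s)."]
  let parts := if wind_zones.isEmpty then parts else
    parts ++ ["Atencion: " ++ PySem.Int.toStr (wind_zones.length : Int) ++ " zona(s) de viento lateral."]
  let parts := if rain_zones.isEmpty then parts else
    parts ++ ["Prevision de lluvia en " ++ PySem.Int.toStr (rain_zones.length : Int) ++ " tramo(s)."]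
  let est_time := (PySem.Dict.mk stats).getD "est_time_min" 0
  let parts := if est_time == 0 then parts else
    let hours := PySem.Int.floordiv est_time 60
    let mins := PySem.Int.mod est_time 60
    parts ++ ["Tiempo estimado: " ++ PySem.Int.toStr hours ++ "h" ++ pvPad2 mins ++ "."]
  let high_events := roadbook.filter pvHighSev
  let parts := if high_events.isEmpty then parts else
    parts ++ [PySem.Int.toStr (high_events.length : Int) ++ " evento(s) de prioridad ALTA."]
  [("summary", PySem.Str.join " " parts)]

-- ===== PORT B =====
-- the single counting pass: counts[t] += 1 and the high-severity counter
def pvCountStep (acc : PySem.Dict String Int × Int) (e : List (String × String)) : PySem.Dict String Int × Int :=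
  (acc.1.modify (pvTypeGet e) 0 (· + 1), if pvHighSev e then acc.2 + 1 else acc.2)

def build_tactical_summary_py_alt (stats : List (String × Int)) (roadbook : List (List (String × String))) : List (String × String) :=
  let st := roadbook.foldl pvCountStep (PySem.Dict.empty, 0)
  let counts := st.1
  let high := st.2
  let parts : List String :=
    ["Etapa de " ++ PySem.Int.toStr ((PySem.Dict.mk stats).getD "d_pos" 0) ++ "m D+ con "
      ++ PySem.Int.toStr (counts.getD "climb" 0) ++ " puerto(s)."]
  let n := counts.getD "descent" 0
  let parts := if n == 0 then parts else
    parts ++ [PySem.Int.toStr n ++ " descenso(s) tecnico(s)."]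
  let n := counts.getD "wind" 0
  let parts := if n == 0 then parts else
    parts ++ ["Atencion: " ++ PySem.Int.toStr n ++ " zona(s) de viento lateral."]
  let n := counts.getD "rain" 0
  let parts := if n == 0 then parts else
    parts ++ ["Prevision de lluvia en " ++ PySem.Int.toStr n ++ " tramo(s)."]
  let est_time := (PySem.Dict.mk stats).getD "est_time_min" 0
  let parts := if est_time == 0 then parts else
    parts ++ ["Tiempo estimado: " ++ PySem.Int.toStr (PySem.Int.floordiv est_time 60) ++ "h"
      ++ pvPad2 (PySem.Int.mod est_time 60) ++ "."]
  let parts := if high == 0 then parts else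
    parts ++ [PySem.Int.toStr high ++ " evento(s) de prioridad ALTA."]
  [("summary", PySem.Str.join " " parts)]

-- ===== PRECONDITION & SPEC =====
-- Pre_ excludes exactly the inputs where a roadbook entry lacks the "type" key: there Python A
-- (and B) raise KeyError, so no return value is claimed.
def Pre_build_tactical_summary_py (stats : List (String × Int)) (roadbook : List (List (String × String))) : Prop :=
  ∀ e ∈ roadbook, ((PySem.Dict.mk e).get? "type").isSome
instance (stats : List (String × Int)) (roadbook : List (List (String × String))) : Decidable (Pre_build_tactical_summary_py stats roadbook) := by unfold Pre_build_tactical_summary_py; infer_instance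

def pvWitness_build_tactical_summary_py : (List (String × Int)) × (List (List (String × String))) :=
  ([("d_pos", 1200), ("est_time_min", 150)],
   [[("type", "climb"), ("severity", "high")], [("type", "wind")]])

def Spec_build_tactical_summary_py (stats : List (String × Int)) (roadbook : List (List (String × String))) (out : List (String × String)) : Prop := out = build_tactical_summary_py_alt stats roadbook
instance (stats : List (String × Int)) (roadbook : List (List (String × String))) (out : List (String × String)) : Decidable (Spec_build_tactical_summary_py stats roadbook out) := by unfold Spec_build_tactical_summary_py; infer_instance

-- ===== CLAIM (what is proved, stated in full; the proofs are below) =====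
def Claim_equal_build_tactical_summary_py : Prop := ∀ (stats : List (String × Int)) (roadbook : List (List (String × String))), Dom_build_tactical_summary_py stats roadbook → Pre_build_tactical_summary_py stats roadbook → Spec_build_tactical_summary_py stats roadbook (build_tactical_summary_py stats roadbook)

-- ===== LEMMAS AND PROOFS =====

-- the pair fold splits into the dict fold and the high-severity count
theorem pvFold_split (rb : List (List (String × String))) (d : PySem.Dict String Int) (h : Int) :
    rb.foldl pvCountStep (d, h)
      = (rb.foldl (fun d e => d.modify (pvTypeGet e) 0 (· + 1)) d,
         h + ((rb.filter pvHighSev).length : Int)) := by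
  induction rb generalizing d h with
  | nil => simp
  | cons e rb ih =>
    simp only [List.foldl_cons, List.filter_cons, pvCountStep, ih]
    by_cases hs : pvHighSev e
    · simp [hs]; omega
    · simp [hs]

-- the count table read back at c is the length of A's filter for type c
theorem pvCounts_getD (rb : List (List (String × String))) (c : String) :
    (rb.foldl (fun d e => d.modify (pvTypeGet e) 0 (· + 1)) PySem.Dict.empty).getD c 0
      = ((rb.filter (fun e => pvTypeGet e == c)).length : Int) := by
  rw [← List.foldl_map (f := pvTypeGet) (g := fun (d : PySem.Dict String Int) x => d.modify x 0 (· + 1)),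
    PySem.Dict.getD_foldl_modify_add_one]
  rw [List.count_eq_countP, List.countP_map, List.countP_eq_length_filter]
  simp [Function.comp_def]

theorem pvIsEmpty_iff_len (l : List α) : l.isEmpty = ((l.length : Int) == 0) := by
  cases l
  · simp
  · simp
    omega

-- ===== VERDICT (by name: the statement is the Claim_ definition above) =====
theorem build_tactical_summary_py_spec : Claim_equal_build_tactical_summary_py := by
  intro stats roadbook _ _
  unfold Spec_build_tactical_summary_py build_tactical_summary_py build_tactical_summary_py_alt
  simp only [pvFold_split, pvCounts_getD, pvIsEmpty_iff_len, Int.zero_add]
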